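-- pv_equiv track=rewrite | github.com/aouggad-web/afcfta-final-002 | backend/etl/news_aggregator.py | get_news_by_region
-- ===== SOURCE A (Python) =====
-- from typing import List, Dict, Optional
--
-- def get_news_by_region(articles: List[Dict]) -> Dict[str, List[Dict]]:
--     """Grouper les articles par région"""
--     by_region = {}
--     for article in articles:
--         region = article.get("region", "Afrique")
--         if region not in by_region:
--             by_region[region] = []
--         by_region[region].append(article)
--     return by_region
-- ===== SOURCE B (Python) =====
-- def get_news_by_region(articles):
--     """Grouper les articles par région"""
--     regions = list(dict.fromkeys(a.get("region", "Afrique") for a in articles))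
--     return {r: [a for a in articles if a.get("region", "Afrique") == r] for r in regions}
-- ===== Notes on version B (the rewrite author's own statement) =====
-- stated objective: simpler
-- what changed: Replaces A's single incremental pass that mutates a dict (conditional key creation + append) by a two-pass decomposition: collect the distinct region keys in first-appearance order with dict.fromkeys, then build each group with one filter comprehension per region.
import Mathlib
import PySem

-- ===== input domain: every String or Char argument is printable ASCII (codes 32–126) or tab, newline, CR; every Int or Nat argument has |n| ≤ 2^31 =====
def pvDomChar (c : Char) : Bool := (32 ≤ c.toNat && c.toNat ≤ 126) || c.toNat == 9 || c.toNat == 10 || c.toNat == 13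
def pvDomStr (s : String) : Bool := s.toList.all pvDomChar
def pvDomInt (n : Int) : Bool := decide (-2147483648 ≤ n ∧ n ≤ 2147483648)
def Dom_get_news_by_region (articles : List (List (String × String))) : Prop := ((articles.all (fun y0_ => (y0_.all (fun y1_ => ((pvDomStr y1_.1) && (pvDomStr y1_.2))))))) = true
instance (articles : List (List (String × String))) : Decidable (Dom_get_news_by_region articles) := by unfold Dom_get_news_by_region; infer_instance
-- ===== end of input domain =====

-- B replaces A's incremental dict-building pass by a two-pass decomposition (distinct
-- region keys first, then one filter comprehension per region); objective: simpler/alternative.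

-- article.get("region", "Afrique"): first-match lookup with default (shared by both ports)
def pvRegion (article : List (String × String)) : String :=
  (PySem.Dict.mk article).getD "region" "Afrique"

-- ===== PORT A =====
def get_news_by_region (articles : List (List (String × String))) : List (String × List (List (String × String))) :=
  (articles.foldl
    (fun by_region article =>
      let region := pvRegion article
      let by_region := if by_region.contains region then by_region else by_region.insert region []
      by_region.modify region [] (fun l => l ++ [article]))   -- by_region[region].append(article)
    PySem.Dict.empty).items

-- ===== PORT B =====
def get_news_by_region_alt (articles : List (List (String × String))) : List (String × List (List (String × String))) :=
  let regions := PySem.Set.ofList (articles.map pvRegion)    -- dict.fromkeys(...)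
  regions.map (fun r => (r, articles.filter (fun a => pvRegion a == r)))

-- ===== PRECONDITION & SPEC =====
def Spec_get_news_by_region (articles : List (List (String × String))) (out : List (String × List (List (String × String)))) : Prop := out = get_news_by_region_alt articles
instance (articles : List (List (String × String))) (out : List (String × List (List (String × String)))) : Decidable (Spec_get_news_by_region articles out) := by unfold Spec_get_news_by_region; infer_instance

-- ===== CLAIM (what is proved, stated in full; the proofs are below) =====
def Claim_equal_get_news_by_region : Prop := ∀ (articles : List (List (String × String))), Dom_get_news_by_region articles → Spec_get_news_by_region articles (get_news_by_region articles)

-- ===== LEMMAS AND PROOFS =====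

-- Ensuring the key with [] and then modifying it is the same as one modify with default [].
theorem pv_step_collapse {V : Type} (d : PySem.Dict String (List V)) (r : String)
    (f : List V → List V) :
    (if d.contains r then d else d.insert r []).modify r [] f = d.modify r [] f := by
  by_cases h : d.contains r = true
  · simp [h]
  · have h' : d.contains r = false := by simpa using h
    simp only [h', Bool.false_eq_true, if_false, PySem.Dict.modify,
      PySem.Dict.getD_insert_self, PySem.Dict.insert_insert_self,
      PySem.Dict.getD_of_not_contains d [] h']

theorem pv_main (articles : List (List (String × String))) :
    get_news_by_region articles = get_news_by_region_alt articles := by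
  have hstep :
      (fun (d : PySem.Dict String (List (List (String × String)))) article =>
        let region := pvRegion article
        let d' := if d.contains region then d else d.insert region []
        d'.modify region [] (fun l => l ++ [article]))
      = fun d a => d.modify (pvRegion a) [] (fun l => l ++ [a]) := by
    funext d a
    exact pv_step_collapse d (pvRegion a) _
  have hF :
      get_news_by_region articles
        = (articles.foldl (fun d a => d.modify (pvRegion a) [] (fun l => l ++ [a]))
            PySem.Dict.empty).items := by
    unfold get_news_by_region
    rw [hstep]
  set F := articles.foldl (fun d a => d.modify (pvRegion a) [] (fun l => l ++ [a]))
      PySem.Dict.empty with hFdef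
  have hkeys : F.keys = PySem.Set.ofList (articles.map pvRegion) := by
    have h := PySem.Dict.keys_foldl_modify_key (l := articles) (key := pvRegion)
      (d0 := ([] : List (List (String × String)))) (f := fun _ a l => l ++ [a])
      (d := PySem.Dict.empty)
    simpa [PySem.Dict.keys_empty, PySem.Set.update_nil_left] using h
  have hnd : F.keys.Nodup := by
    have h := PySem.Dict.nodup_keys_foldl_modify_key (l := articles) (key := pvRegion)
      (d0 := ([] : List (List (String × String)))) (f := fun _ a l => l ++ [a])
      (d := PySem.Dict.empty) (by simp [PySem.Dict.keys_empty])
    simpa using h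
  have hget : ∀ c, F.getD c [] = articles.filter (fun a => pvRegion a == c) := by
    intro c
    have hmap : F = (articles.map (fun a => (pvRegion a, a))).foldl
        (fun d p => d.modify p.1 [] (fun l => l ++ [p.2])) PySem.Dict.empty := by
      rw [hFdef, List.foldl_map]
    rw [hmap, PySem.Dict.getD_foldl_modify_append]
    simp [List.filter_map, Function.comp_def, List.map_map]
  rw [hF]
  rw [PySem.Dict.items_eq_map_keys F hnd []]
  rw [hkeys]
  unfold get_news_by_region_alt
  exact List.map_congr_left (fun k _ => by rw [hget k])

-- ===== VERDICT (by name: the statement is the Claim_ definition above) =====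
theorem get_news_by_region_spec : Claim_equal_get_news_by_region := by
  intro articles _
  unfold Spec_get_news_by_region
  exact pv_main articles
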